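-- pv_equiv track=rewrite | github.com/sebi06/czi_demos | tools/czimetadata.py | get_dimorder
-- ===== SOURCE A (Python) =====
-- def get_dimorder(dimstring):
--     """Get the order of dimensions from dimension string
--
--     :param dimstring: string containing the dimensions
--     :type dimstring: str
--     :return: dims_dict - dictionary with the dimensions and its positions
--     :rtype: dict
--     :return: dimindex_list - list with indices of dimensions
--     :rtype: list
--     :return: numvalid_dims - number of valid dimensions
--     :rtype: integer
--     """
--
--     dimindex_list = []
--     dims = ['R', 'I', 'M', 'H', 'V', 'B', 'S', 'T', 'C', 'Z', 'Y', 'X', 'A']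
--     dims_dict = {}
--
--     # loop over all dimensions and find the index
--     for d in dims:
--         dims_dict[d] = dimstring.find(d)
--         dimindex_list.append(dimstring.find(d))
--
--     # check if a dimension really exists
--     numvalid_dims = sum(i > 0 for i in dimindex_list)
--
--     return dims_dict, dimindex_list, numvalid_dims
-- ===== SOURCE B (Python) =====
-- def get_dimorder(dimstring):
--     """Get the order of dimensions from dimension string.
--
--     Single reverse pass over the string writing into a fixed positional
--     array: scanning back-to-front and overwriting unconditionally leaves
--     exactly the FIRST occurrence of each dimension letter in the array.
--     """
--     DIMS = 'RIMHVBSTCZYXA'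
--     pos = [-1] * 13
--     for i, ch in reversed(list(enumerate(dimstring))):
--         k = DIMS.find(ch)
--         if k != -1:
--             pos[k] = i
--
--     dims_dict = dict(zip(DIMS, pos))
--     numvalid_dims = sum(p > 0 for p in pos)
--
--     return dims_dict, pos, numvalid_dims
-- ===== Notes on version B (the rewrite author's own statement) =====
-- stated objective: alternative
-- what changed: Replaces the 13 per-dimension dimstring.find scans by one reverse pass over the string that writes each letter's index into a fixed 13-slot positional array (back-to-front overwriting leaves the first occurrence, absent letters stay -1); the dict is assembled at the end with dict(zip(...)) and the >0 count is unchanged.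
import Mathlib
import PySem

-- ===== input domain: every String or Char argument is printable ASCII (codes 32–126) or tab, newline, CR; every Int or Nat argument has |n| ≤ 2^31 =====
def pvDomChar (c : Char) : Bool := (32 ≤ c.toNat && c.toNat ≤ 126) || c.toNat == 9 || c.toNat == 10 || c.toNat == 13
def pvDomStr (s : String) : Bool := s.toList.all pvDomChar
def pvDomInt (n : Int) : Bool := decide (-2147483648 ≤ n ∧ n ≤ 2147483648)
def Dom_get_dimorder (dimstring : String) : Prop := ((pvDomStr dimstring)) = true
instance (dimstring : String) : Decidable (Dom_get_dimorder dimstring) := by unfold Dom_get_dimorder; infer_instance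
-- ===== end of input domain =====

-- B replaces A's 13 per-dimension dimstring.find scans by ONE reverse pass over the string writing indices into a fixed 13-slot positional array (back-to-front overwrite keeps the first occurrence); objective: alternative algorithm, not measured faster.

-- ===== PORT A =====
def get_dimorder (dimstring : String) : (List (String × Int)) × List Int × Int :=
  let dims : List String := ["R", "I", "M", "H", "V", "B", "S", "T", "C", "Z", "Y", "X", "A"]
  let acc := dims.foldl
    (fun (acc : PySem.Dict String Int × List Int) d =>
      (acc.1.insert d (PySem.Str.find dimstring d), acc.2 ++ [PySem.Str.find dimstring d]))
    (PySem.Dict.empty, [])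
  let numvalid_dims : Int := acc.2.foldl (fun s i => s + (if i > 0 then 1 else 0)) 0
  (acc.1.items, acc.2, numvalid_dims)

-- ===== PORT B =====
-- the 13 dimension letters, in order (Source B's DIMS string)
def pvDims : List Char := ['R', 'I', 'M', 'H', 'V', 'B', 'S', 'T', 'C', 'Z', 'Y', 'X', 'A']

-- the loop body of Source B's reverse pass (ch is a length-1 str in Python, hence String.ofList [p.2])
def pvStepB (pos : List Int) (p : Int × Char) : List Int :=
  let k := PySem.Str.find "RIMHVBSTCZYXA" (String.ofList [p.2])
  if k ≠ -1 then pos.set k.toNat p.1 else pos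

def get_dimorder_alt (dimstring : String) : (List (String × Int)) × List Int × Int :=
  let pos := ((PySem.List.enumerate dimstring.toList).reverse).foldl pvStepB (List.replicate 13 (-1))
  let dims_dict := ((pvDims.map (fun c => String.ofList [c])).zip pos).foldl
    (fun (d : PySem.Dict String Int) p => d.insert p.1 p.2) PySem.Dict.empty
  let numvalid_dims : Int := pos.foldl (fun s p => s + (if p > 0 then 1 else 0)) 0
  (dims_dict.items, pos, numvalid_dims)

-- ===== PRECONDITION & SPEC =====
def Spec_get_dimorder (dimstring : String) (out : (List (String × Int)) × List Int × Int) : Prop := out = get_dimorder_alt dimstring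
instance (dimstring : String) (out : (List (String × Int)) × List Int × Int) : Decidable (Spec_get_dimorder dimstring out) := by unfold Spec_get_dimorder; infer_instance

-- ===== CLAIM (what is proved, stated in full; the proofs are below) =====
def Claim_equal_get_dimorder : Prop := ∀ (dimstring : String), Dom_get_dimorder dimstring → Spec_get_dimorder dimstring (get_dimorder dimstring)

-- ===== LEMMAS AND PROOFS =====

-- [c] is a prefix of l iff l starts with c
theorem pv_singleton_prefix (c : Char) (l : List Char) : [c] <+: l ↔ l.head? = some c := by
  cases l with
  | nil => simp
  | cons x xs => simp [List.cons_prefix_cons, eq_comm]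

-- Chars.find for a single-character pattern is the index of the first occurrence, or -1
theorem pv_find_single (chars : List Char) (c : Char) :
    PySem.Chars.find chars [c] =
      if c ∈ chars then ((chars.findIdx (· == c) : Nat) : Int) else -1 := by
  by_cases hc : c ∈ chars
  · have hinf : [c] <:+: chars := by
      obtain ⟨s, t, rfl⟩ := List.append_of_mem hc
      exact ⟨s, t, by simp⟩
    have h0 : 0 ≤ PySem.Chars.find chars [c] := (PySem.Chars.find_nonneg_iff _ _).mpr hinf
    obtain ⟨hpre, hmin⟩ := PySem.Chars.find_spec h0
    set n := (PySem.Chars.find chars [c]).toNat with hn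
    have hget : chars[n]? = some c := by
      have := (pv_singleton_prefix c (chars.drop n)).mp hpre
      rwa [List.head?_drop] at this
    have hlt : n < chars.length := by
      by_contra h
      simp [List.getElem?_eq_none (le_of_not_gt h)] at hget
    have hgetn : chars[n] = c := by
      rw [List.getElem?_eq_getElem hlt] at hget
      exact Option.some.inj hget
    have hidx : chars.findIdx (· == c) = n := by
      rw [List.findIdx_eq hlt]
      refine ⟨by simp [hgetn], ?_⟩
      intro j hj
      have hj' : ¬ [c] <+: chars.drop j := hmin j hj
      rw [pv_singleton_prefix, List.head?_drop] at hj'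
      have hjl : j < chars.length := lt_trans hj hlt
      simp only [List.getElem?_eq_getElem hjl] at hj'
      simp only [beq_eq_false_iff_ne, ne_eq]
      intro h
      exact hj' (by rw [h])
    rw [if_pos hc, hidx, hn]
    omega
  · have : PySem.Chars.find chars [c] = -1 := by
      rw [PySem.Chars.find_eq_neg_one_iff]
      intro h
      exact hc (h.subset (List.mem_singleton_self c))
    simp [this, hc]

-- setting the slot of x (a member of a duplicate-free l) in a map over l
theorem pv_set_map (l : List Char) (hn : l.Nodup) (f : Char → Int) (x : Char) (hx : x ∈ l) (v : Int) :
    (l.map f).set (l.findIdx (· == x)) v = l.map (fun c => if c = x then v else f c) := by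
  induction l with
  | nil => cases hx
  | cons c cs ih =>
    by_cases h : c = x
    · subst h
      have hnot : c ∉ cs := (List.nodup_cons.mp hn).1
      simp only [List.findIdx_cons, beq_self_eq_true, cond_true, List.map_cons, List.set_cons_zero]
      congr 1
      refine (List.map_congr_left ?_).symm
      intro a ha
      have hax : a ≠ c := fun hac => hnot (hac ▸ ha)
      rw [if_neg hax]
    · have hbe : (c == x) = false := by simp [h]
      have hxcs : x ∈ cs := by
        rcases List.mem_cons.mp hx with h' | h'
        · exact absurd h'.symm h
        · exact h'
      simp only [List.findIdx_cons, hbe, cond_false, List.map_cons, List.set_cons_succ,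
        if_neg h]
      rw [ih (List.nodup_cons.mp hn).2 hxcs]

-- pointwise step of the invariant, away from the head character
theorem pv_ptwise (x : Char) (xs : List Char) (s : Int) (f : Char → Int) (c : Char) (hcx : c ≠ x) :
    (if c ∈ xs then (s + 1) + ((xs.findIdx (· == c) : Nat) : Int) else f c)
    = if c ∈ x :: xs then s + (((x :: xs).findIdx (· == c) : Nat) : Int) else f c := by
  have hbe : (x == c) = false := by simp [Ne.symm hcx]
  have hmem : (c ∈ x :: xs) ↔ c ∈ xs := by simp [hcx]
  by_cases hm : c ∈ xs
  · rw [if_pos hm, if_pos (hmem.mpr hm)]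
    rw [List.findIdx_cons, hbe, cond_false]
    push_cast
    ring
  · rw [if_neg hm, if_neg (fun h => hm (hmem.mp h))]

-- invariant of Source B's reverse pass: folding the reversed enumeration (as a foldr) over a
-- "map over pvDims" array records the first occurrence of every dimension letter
theorem pv_foldr_inv (chars : List Char) : ∀ (s : Int) (f : Char → Int),
    (PySem.List.enumerate chars s).foldr (fun p acc => pvStepB acc p) (pvDims.map f)
    = pvDims.map (fun c => if c ∈ chars then s + ((chars.findIdx (· == c) : Nat) : Int) else f c) := by
  induction chars with
  | nil =>
    intro s f
    simp [PySem.List.enumerate_nil]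
  | cons x xs ih =>
    intro s f
    rw [PySem.List.enumerate_cons, List.foldr_cons, ih (s + 1) f]
    show pvStepB _ (s, x) = _
    unfold pvStepB
    have hfind : PySem.Str.find "RIMHVBSTCZYXA" (String.ofList [x])
        = if x ∈ pvDims then ((pvDims.findIdx (· == x) : Nat) : Int) else -1 := by
      rw [PySem.Str.find_eq]
      rw [show (String.ofList [x]).toList = [x] from by simp]
      exact pv_find_single _ x
    by_cases hx : x ∈ pvDims
    · rw [hfind, if_pos hx]
      have hne : ((pvDims.findIdx (· == x) : Nat) : Int) ≠ -1 := by
        have := Int.natCast_nonneg (pvDims.findIdx (· == x))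
        omega
      simp only [hne, ne_eq, not_false_eq_true, if_pos, Int.toNat_natCast]
      rw [pv_set_map pvDims (by decide) _ x hx s]
      refine List.map_congr_left ?_
      intro c _
      by_cases hcx : c = x
      · subst hcx
        rw [if_pos rfl, if_pos (List.mem_cons_self), List.findIdx_cons]
        simp
      · rw [if_neg hcx]
        exact pv_ptwise x xs s f c hcx
    · rw [hfind, if_neg hx]
      simp only [ne_eq, not_true_eq_false, if_neg, not_false_eq_true]
      refine List.map_congr_left ?_
      intro c hc
      have hcx : c ≠ x := fun h => hx (h ▸ hc)
      exact pv_ptwise x xs s f c hcx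

-- the final array of Source B's reverse pass is exactly str.find for each dimension letter
theorem pvPos_eq (dimstring : String) :
    ((PySem.List.enumerate dimstring.toList).reverse).foldl pvStepB (List.replicate 13 (-1))
    = pvDims.map (fun c => PySem.Str.find dimstring (String.ofList [c])) := by
  rw [List.foldl_reverse]
  rw [show (List.replicate 13 (-1 : Int)) = pvDims.map (fun _ => -1) from rfl]
  rw [pv_foldr_inv dimstring.toList 0 (fun _ => -1)]
  refine List.map_congr_left ?_
  intro c _
  rw [PySem.Str.find_eq]
  rw [show (String.ofList [c]).toList = [c] from by simp]
  rw [pv_find_single]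
  by_cases h : c ∈ dimstring.toList
  · rw [if_pos h, if_pos h]; ring
  · rw [if_neg h, if_neg h]

-- ===== VERDICT (by name: the statement is the Claim_ definition above) =====
theorem get_dimorder_spec : Claim_equal_get_dimorder := by
  intro dimstring _
  unfold Spec_get_dimorder get_dimorder get_dimorder_alt
  rw [pvPos_eq]
  simp only [pvDims, List.map_cons, List.map_nil, List.zip_cons_cons, List.zip_nil_right,
    List.foldl_cons, List.foldl_nil]
  rw [show ("R" : String) = String.ofList ['R'] from rfl,
      show ("I" : String) = String.ofList ['I'] from rfl,
      show ("M" : String) = String.ofList ['M'] from rfl,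
      show ("H" : String) = String.ofList ['H'] from rfl,
      show ("V" : String) = String.ofList ['V'] from rfl,
      show ("B" : String) = String.ofList ['B'] from rfl,
      show ("S" : String) = String.ofList ['S'] from rfl,
      show ("T" : String) = String.ofList ['T'] from rfl,
      show ("C" : String) = String.ofList ['C'] from rfl,
      show ("Z" : String) = String.ofList ['Z'] from rfl,
      show ("Y" : String) = String.ofList ['Y'] from rfl,
      show ("X" : String) = String.ofList ['X'] from rfl,
      show ("A" : String) = String.ofList ['A'] from rfl]
  simp
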